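-- pv_equiv track=rewrite | github.com/andrewcropper/aaai20-forgetgol | metalong.py | get_sizes
-- ===== SOURCE A (Python) =====
-- def get_sizes(lookup):
--     dependencies = {k:set(v) for k,v in lookup.items()}
--     def mydeps(x):
--         deps = set([])
--         for child in dependencies[x]:
--             if child not in dependencies:
--                 continue
--             if child == x:
--                 continue
--             deps.add(child)
--             for v in mydeps(child):
--                 deps.add(v)
--         return deps
--
--     def mydepsize(x):
--         return len(mydeps(x)) + 1
--
--     return {k:mydepsize(k) for k in lookup.keys()}
-- ===== SOURCE B (Python) =====
-- def get_sizes(lookup):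
--     # Memoized DFS: each node's transitive-dependency set is computed once and
--     # cached, instead of A's repeated recursion recomputing every child's set.
--     # Only completed sets are cached, so on cyclic input it recurses
--     # unboundedly (RecursionError), exactly like A.
--     memo = {}
--     def closure(x):
--         if x not in memo:
--             s = set()
--             for c in lookup[x]:
--                 if c != x and c in lookup:
--                     s.add(c)
--                     s |= closure(c)
--             memo[x] = s
--         return memo[x]
--     return {k: len(closure(k)) + 1 for k in lookup}
-- ===== Notes on version B (the rewrite author's own statement) =====
-- stated objective: alternative
-- what changed: Replaces A's repeated recursion (which recomputes every child's transitive-dependency set at each use, for every key) by a memoized DFS that computes and caches each node's closure set exactly once; on cyclic inputs both recurse unboundedly and raise RecursionError, and Pre_ excludes exactly those.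
import Mathlib
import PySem

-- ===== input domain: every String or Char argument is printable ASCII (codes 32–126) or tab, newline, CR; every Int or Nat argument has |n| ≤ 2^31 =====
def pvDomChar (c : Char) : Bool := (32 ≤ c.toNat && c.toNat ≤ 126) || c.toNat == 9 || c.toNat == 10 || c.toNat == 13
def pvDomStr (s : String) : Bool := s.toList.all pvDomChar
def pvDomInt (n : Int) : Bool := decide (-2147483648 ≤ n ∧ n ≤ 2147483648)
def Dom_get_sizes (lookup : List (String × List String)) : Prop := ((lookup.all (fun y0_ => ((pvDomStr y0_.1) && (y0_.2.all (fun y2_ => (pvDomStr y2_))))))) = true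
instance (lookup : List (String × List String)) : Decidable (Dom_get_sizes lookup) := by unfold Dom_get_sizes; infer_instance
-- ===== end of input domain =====

-- B is a memoized DFS: each node's transitive-dependency set is computed and
-- cached once (only completed sets are cached), instead of A's repeated
-- recursion recomputing it at every use.

-- ===== PORT A =====
-- dependencies = {k: set(v) for k, v in lookup.items()}
def get_sizes_deps (lookup : List (String × List String)) : PySem.Dict String (PySem.Set String) :=
  (PySem.Dict.ofList lookup).items.foldl
    (fun d p => d.insert p.1 (PySem.Set.ofList p.2)) PySem.Dict.empty

-- mydeps(x); the Nat argument is fuel making the recursion structural (the Python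
-- recursion terminates exactly on acyclic inputs, where the given fuel suffices).
def get_sizes_mydeps (dep : PySem.Dict String (PySem.Set String)) :
    Nat → String → PySem.Set String
  | 0, _ => PySem.Set.empty
  | fuel + 1, x =>
      (dep.getD x PySem.Set.empty).foldl
        (fun deps child =>
          if dep.contains child = false then deps          -- if child not in dependencies: continue
          else if child = x then deps                      -- if child == x: continue
          else
            -- deps.add(child); for v in mydeps(child): deps.add(v)
            (get_sizes_mydeps dep fuel child).foldl
              (fun s v => PySem.Set.add s v) (PySem.Set.add deps child))
        PySem.Set.empty

def get_sizes (lookup : List (String × List String)) : List (String × Int) :=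
  let dep := get_sizes_deps lookup
  -- {k: mydepsize(k) for k in lookup.keys()}
  (PySem.Dict.ofList lookup).keys.map
    (fun k => (k, ((get_sizes_mydeps dep (dep.size + 1) k).length : Int) + 1))

-- ===== PORT B =====
-- closure(x) with memo threaded through: the Nat argument is fuel making the
-- recursion structural (only completed sets are cached, and on the acyclic
-- inputs Pre_ admits the nested fresh calls hold pairwise distinct keys, so
-- d0.size + 1 fuel is never exhausted; on cyclic inputs the Python raises
-- RecursionError, outside Pre_).
def get_sizes_alt_closure (d0 : PySem.Dict String (List String)) :
    Nat → String → PySem.Dict String (PySem.Set String) →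
      PySem.Set String × PySem.Dict String (PySem.Set String)
  | 0, _, memo => (PySem.Set.empty, memo)
  | fuel + 1, x, memo =>
    match memo.get? x with
    | some s => (s, memo)                               -- cache hit: return memo[x]
    | none =>
      let r := (d0.getD x []).foldl                     -- s = set(); for c in lookup[x]:
        (fun (acc : PySem.Set String × PySem.Dict String (PySem.Set String)) c =>
          if c = x then acc                             -- if c != x
          else if d0.contains c = false then acc        -- and c in lookup:
          else
            let rc := get_sizes_alt_closure d0 fuel c acc.2
            (PySem.Set.update (PySem.Set.add acc.1 c) rc.1, rc.2))  -- s.add(c); s |= closure(c)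
        (PySem.Set.empty, memo)
      (r.1, r.2.insert x r.1)                           -- memo[x] = s; return memo[x]

def get_sizes_alt (lookup : List (String × List String)) : List (String × Int) :=
  let d0 := PySem.Dict.ofList lookup
  -- {k: len(closure(k)) + 1 for k in lookup}
  let res := d0.keys.foldl
    (fun (acc : PySem.Dict String Int × PySem.Dict String (PySem.Set String)) k =>
      let r := get_sizes_alt_closure d0 (d0.size + 1) k acc.2
      (acc.1.insert k ((r.1.length : Int) + 1), r.2))
    (PySem.Dict.empty, PySem.Dict.empty)
  res.1.items

-- ===== PRECONDITION & SPEC =====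
-- edge a→b of the key-to-key dependency graph (non-key children and self-loops dropped)
def pvEdgeB (lookup : List (String × List String)) (a b : String) : Bool :=
  let d0 := PySem.Dict.ofList lookup
  d0.contains b && b != a && (d0.getD a []).contains b

def pvPeel (lookup : List (String × List String)) (alive : List String) : List String :=
  alive.filter (fun a => alive.any (fun b => pvEdgeB lookup a b))

-- Pre_ excludes exactly the lookups whose key-to-key dependency graph (ignoring
-- self-loops and non-key children) contains a cycle: on those both A's and B's
-- recursion raise RecursionError. Acyclicity is stated by sink-peeling: repeatedly
-- keeping only nodes that still have an outgoing edge empties the graph iff acyclic.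
def Pre_get_sizes (lookup : List (String × List String)) : Prop :=
  (pvPeel lookup)^[(PySem.Dict.ofList lookup).size] (PySem.Dict.ofList lookup).keys = []
instance (lookup : List (String × List String)) : Decidable (Pre_get_sizes lookup) := by
  unfold Pre_get_sizes; infer_instance

def pvWitness_get_sizes : (List (String × List String)) :=
  [("a", ["b", "c", "a", "x"]), ("b", ["c"]), ("c", [])]

def Spec_get_sizes (lookup : List (String × List String)) (out : List (String × Int)) : Prop := out = get_sizes_alt lookup
instance (lookup : List (String × List String)) (out : List (String × Int)) : Decidable (Spec_get_sizes lookup out) := by unfold Spec_get_sizes; infer_instance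

-- ===== CLAIM (what is proved, stated in full; the proofs are below) =====
def Claim_equal_get_sizes : Prop := ∀ (lookup : List (String × List String)), Dom_get_sizes lookup → Pre_get_sizes lookup → Spec_get_sizes lookup (get_sizes lookup)

-- ===== LEMMAS AND PROOFS =====

def pvD0 (lookup : List (String × List String)) : PySem.Dict String (List String) :=
  PySem.Dict.ofList lookup

def pvE (lookup : List (String × List String)) (a b : String) : Prop :=
  pvEdgeB lookup a b = true

def pvReach (lookup : List (String × List String)) (a b : String) : Prop :=
  Relation.TransGen (pvE lookup) a b

def pvAcyclic (lookup : List (String × List String)) : Prop :=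
  ∀ x, ¬ pvReach lookup x x

-- ---- dictionary bridging ----

theorem pv_dep_items (lookup : List (String × List String)) :
    (get_sizes_deps lookup).items
      = (pvD0 lookup).items.map (fun p => (p.1, PySem.Set.ofList p.2)) := by
  unfold get_sizes_deps pvD0
  rw [PySem.Dict.items_foldl_insert_fresh (PySem.Dict.ofList lookup).items (·.1)
        (fun p => PySem.Set.ofList p.2) PySem.Dict.empty
        (by intro a _; exact PySem.Dict.contains_empty _)
        (PySem.Dict.nodup_keys_ofList lookup)]
  simp [PySem.Dict.empty]

theorem pv_dep_keys (lookup : List (String × List String)) :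
    (get_sizes_deps lookup).keys = (pvD0 lookup).keys := by
  simp [PySem.Dict.keys, pv_dep_items, Function.comp]

theorem pv_dep_nodup_keys (lookup : List (String × List String)) :
    (get_sizes_deps lookup).keys.Nodup := by
  rw [pv_dep_keys]; exact PySem.Dict.nodup_keys_ofList lookup

theorem pv_dep_contains (lookup : List (String × List String)) (c : String) :
    (get_sizes_deps lookup).contains c = (pvD0 lookup).contains c := by
  rw [PySem.Dict.contains_eq_decide_mem_keys, PySem.Dict.contains_eq_decide_mem_keys,
    pv_dep_keys]

theorem pv_dep_getD_key (lookup : List (String × List String)) {x : String} {v : List String}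
    (h : (pvD0 lookup).get? x = some v) :
    (get_sizes_deps lookup).getD x PySem.Set.empty = PySem.Set.ofList v := by
  apply PySem.Dict.getD_of_mem_items _ _ (pv_dep_nodup_keys lookup)
  rw [pv_dep_items]
  exact List.mem_map.mpr ⟨(x, v), PySem.Dict.mem_items_of_get?_eq_some _ h, rfl⟩

theorem pv_dep_getD_nonkey (lookup : List (String × List String)) {x : String}
    (h : (pvD0 lookup).contains x = false) :
    (get_sizes_deps lookup).getD x PySem.Set.empty = PySem.Set.empty := by
  apply PySem.Dict.getD_of_not_contains
  rw [pv_dep_contains]; exact h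

theorem pv_E_iff (lookup : List (String × List String)) (a b : String) :
    pvE lookup a b ↔
      ((pvD0 lookup).contains b = true ∧ b ≠ a ∧ b ∈ (pvD0 lookup).getD a []) := by
  simp [pvE, pvEdgeB, pvD0, Bool.and_eq_true, bne_iff_ne]
  tauto

theorem pv_E_key (lookup : List (String × List String)) {a b : String}
    (h : pvE lookup a b) : b ∈ (pvD0 lookup).keys := by
  rw [pv_E_iff] at h
  exact (PySem.Dict.contains_iff_mem_keys _ _).mp h.1

theorem pv_reach_key (lookup : List (String × List String)) {a b : String}
    (h : pvReach lookup a b) : b ∈ (pvD0 lookup).keys := by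
  induction h with
  | single h => exact pv_E_key lookup h
  | tail _ h _ => exact pv_E_key lookup h

theorem pv_mem_depset (lookup : List (String × List String)) (x c : String) :
    pvE lookup x c ↔
      (c ∈ (get_sizes_deps lookup).getD x PySem.Set.empty ∧
       (get_sizes_deps lookup).contains c = true ∧ c ≠ x) := by
  rw [pv_E_iff, pv_dep_contains]
  by_cases hx : (pvD0 lookup).contains x = true
  · obtain ⟨v, hv⟩ : ∃ v, (pvD0 lookup).get? x = some v := by
      have := PySem.Dict.contains_eq_isSome_get? (d := pvD0 lookup) (k := x)
      rw [hx] at this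
      exact Option.isSome_iff_exists.mp this.symm
    rw [pv_dep_getD_key lookup hv]
    have hgd : (pvD0 lookup).getD x [] = v := PySem.Dict.getD_of_get?_eq_some _ _ hv
    simp [PySem.Set.mem_ofList, hgd]
    tauto
  · rw [pv_dep_getD_nonkey lookup (by simpa using hx)]
    have : (pvD0 lookup).getD x [] = [] :=
      PySem.Dict.getD_of_not_contains _ _ (by simpa using hx)
    simp [this, PySem.Set.empty]

-- ---- port A: characterisation of mydeps ----

theorem pv_foldl_add_eq_update {α : Type} [BEq α] (s : PySem.Set α) (l : List α) :
    l.foldl (fun s v => PySem.Set.add s v) s = PySem.Set.update s l := rfl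

theorem pv_foldA_mem (lookup : List (String × List String)) (fuel : Nat) (x : String) :
    ∀ (L : List String) (init : PySem.Set String) (y : String),
      y ∈ L.foldl
            (fun deps child =>
              if (get_sizes_deps lookup).contains child = false then deps
              else if child = x then deps
              else (get_sizes_mydeps (get_sizes_deps lookup) fuel child).foldl
                     (fun s v => PySem.Set.add s v) (PySem.Set.add deps child))
            init
        ↔ y ∈ init ∨ ∃ c ∈ L, (get_sizes_deps lookup).contains c = true ∧ c ≠ x ∧
            (y = c ∨ y ∈ get_sizes_mydeps (get_sizes_deps lookup) fuel c) := by
  intro L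
  induction L with
  | nil => simp
  | cons c L ih =>
    intro init y
    simp only [List.foldl_cons]
    by_cases hc : (get_sizes_deps lookup).contains c = false
    · rw [if_pos hc, ih]
      simp [hc]
    · rw [if_neg hc]
      by_cases hcx : c = x
      · rw [if_pos hcx, ih]
        subst hcx
        simp
      · rw [if_neg hcx, ih]
        rw [pv_foldl_add_eq_update, PySem.Set.mem_update, PySem.Set.mem_add]
        have hct : (get_sizes_deps lookup).contains c = true := by
          simpa [Bool.not_eq_false] using hc
        constructor
        · rintro (((hy | hy) | hy) | ⟨c', hc', h1, h2, h3⟩)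
          · exact Or.inl hy
          · exact Or.inr ⟨c, List.mem_cons_self .., hct, hcx, Or.inl hy⟩
          · exact Or.inr ⟨c, List.mem_cons_self .., hct, hcx, Or.inr hy⟩
          · exact Or.inr ⟨c', List.mem_cons_of_mem _ hc', h1, h2, h3⟩
        · rintro (hy | ⟨c', hc', h1, h2, h3⟩)
          · exact Or.inl (Or.inl (Or.inl hy))
          · rcases List.mem_cons.mp hc' with rfl | hc'
            · rcases h3 with rfl | h3
              · exact Or.inl (Or.inl (Or.inr rfl))
              · exact Or.inl (Or.inr h3)
            · exact Or.inr ⟨c', hc', h1, h2, h3⟩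

theorem pv_mydeps_succ (lookup : List (String × List String)) (fuel : Nat) (x y : String) :
    y ∈ get_sizes_mydeps (get_sizes_deps lookup) (fuel + 1) x ↔
      ∃ c, pvE lookup x c ∧
        (y = c ∨ y ∈ get_sizes_mydeps (get_sizes_deps lookup) fuel c) := by
  show y ∈ ((get_sizes_deps lookup).getD x PySem.Set.empty).foldl _ PySem.Set.empty ↔ _
  rw [pv_foldA_mem]
  simp only [PySem.Set.empty, List.not_mem_nil, false_or]
  constructor
  · rintro ⟨c, hcL, h1, h2, h3⟩
    exact ⟨c, (pv_mem_depset lookup x c).mpr ⟨hcL, h1, h2⟩, h3⟩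
  · rintro ⟨c, hE, h3⟩
    obtain ⟨hcL, h1, h2⟩ := (pv_mem_depset lookup x c).mp hE
    exact ⟨c, hcL, h1, h2, h3⟩

theorem pv_mydeps_nodup (lookup : List (String × List String)) :
    ∀ (fuel : Nat) (x : String), (get_sizes_mydeps (get_sizes_deps lookup) fuel x).Nodup := by
  intro fuel
  induction fuel with
  | zero => intro x; simp [get_sizes_mydeps, PySem.Set.empty]
  | succ fuel ih =>
    intro x
    show (((get_sizes_deps lookup).getD x PySem.Set.empty).foldl _ PySem.Set.empty).Nodup
    generalize (get_sizes_deps lookup).getD x PySem.Set.empty = L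
    have : ∀ (init : PySem.Set String), init.Nodup →
        (L.foldl (fun deps child =>
          if (get_sizes_deps lookup).contains child = false then deps
          else if child = x then deps
          else (get_sizes_mydeps (get_sizes_deps lookup) fuel child).foldl
                 (fun s v => PySem.Set.add s v) (PySem.Set.add deps child)) init).Nodup := by
      induction L with
      | nil => intro init h; simpa
      | cons c L ihL =>
        intro init h
        simp only [List.foldl_cons]
        apply ihL
        split_ifs with h1 h2
        · exact h
        · exact h
        · rw [pv_foldl_add_eq_update]
          exact PySem.Set.nodup_update _ _ (PySem.Set.nodup_add _ _ h)
    exact this PySem.Set.empty (by simp [PySem.Set.empty])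

theorem pv_mydeps_sound (lookup : List (String × List String)) :
    ∀ (fuel : Nat) (x y : String),
      y ∈ get_sizes_mydeps (get_sizes_deps lookup) fuel x → pvReach lookup x y := by
  intro fuel
  induction fuel with
  | zero => intro x y h; simp [get_sizes_mydeps, PySem.Set.empty] at h
  | succ fuel ih =>
    intro x y h
    obtain ⟨c, hE, rfl | hy⟩ := (pv_mydeps_succ lookup fuel x y).mp h
    · exact Relation.TransGen.single hE
    · exact Relation.TransGen.head hE (ih c y hy)

theorem pv_reach_finite (lookup : List (String × List String)) (x : String) :
    ({y | pvReach lookup x y}).Finite :=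
  Set.Finite.subset (pvD0 lookup).keys.finite_toSet (fun _ hz => pv_reach_key lookup hz)

theorem pv_reach_ncard_le (lookup : List (String × List String)) (x : String) :
    ({y | pvReach lookup x y}).ncard ≤ (pvD0 lookup).keys.length := by
  calc ({y | pvReach lookup x y}).ncard
      ≤ (↑(pvD0 lookup).keys.toFinset : Set String).ncard := by
        apply Set.ncard_le_ncard
        · intro z hz
          simp [List.coe_toFinset]
          exact pv_reach_key lookup hz
        · exact (pvD0 lookup).keys.toFinset.finite_toSet
    _ = (pvD0 lookup).keys.toFinset.card := Set.ncard_coe_finset _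
    _ ≤ (pvD0 lookup).keys.length := List.toFinset_card_le _

theorem pv_reach_ncard_lt (lookup : List (String × List String))
    (hacy : pvAcyclic lookup) {x b : String} (hE : pvE lookup x b) :
    ({y | pvReach lookup b y}).ncard < ({y | pvReach lookup x y}).ncard := by
  apply Set.ncard_lt_ncard _ (pv_reach_finite lookup x)
  constructor
  · exact fun z hz => Relation.TransGen.head hE hz
  · intro hsub
    exact hacy b (hsub (Relation.TransGen.single hE))

theorem pv_mydeps_complete (lookup : List (String × List String))
    (hacy : pvAcyclic lookup) :
    ∀ (n : Nat) (x : String) (fuel : Nat) (y : String),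
      ({y | pvReach lookup x y}).ncard = n → n < fuel → pvReach lookup x y →
        y ∈ get_sizes_mydeps (get_sizes_deps lookup) fuel x := by
  intro n
  induction n using Nat.strong_induction_on with
  | _ n ih =>
    intro x fuel y hcard hfuel hreach
    obtain ⟨fuel, rfl⟩ : ∃ f, fuel = f + 1 := ⟨fuel - 1, by omega⟩
    obtain ⟨b, hxb, hby⟩ := Relation.TransGen.head'_iff.mp hreach
    rcases Relation.reflTransGen_iff_eq_or_transGen.mp hby with rfl | hby
    · exact (pv_mydeps_succ lookup fuel x y).mpr ⟨y, hxb, Or.inl rfl⟩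
    · have hlt := pv_reach_ncard_lt lookup hacy hxb
      rw [hcard] at hlt
      refine (pv_mydeps_succ lookup fuel x y).mpr ⟨b, hxb, Or.inr ?_⟩
      exact ih _ hlt b fuel y rfl (by omega) hby

theorem pv_mydeps_iff (lookup : List (String × List String))
    (hacy : pvAcyclic lookup) {fuel : Nat}
    (hfuel : (pvD0 lookup).keys.length < fuel) (x y : String) :
    y ∈ get_sizes_mydeps (get_sizes_deps lookup) fuel x ↔ pvReach lookup x y := by
  constructor
  · exact pv_mydeps_sound lookup fuel x y
  · intro h
    exact pv_mydeps_complete lookup hacy _ x fuel y rfl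
      (lt_of_le_of_lt (pv_reach_ncard_le lookup x) hfuel) h

-- ---- Pre_ (sink-peeling) implies acyclicity ----

theorem pv_cycle_survives (lookup : List (String × List String)) :
    ∀ (n : Nat) (y : String), pvReach lookup y y →
      y ∈ (pvPeel lookup)^[n] (pvD0 lookup).keys := by
  intro n
  induction n with
  | zero => intro y hy; exact pv_reach_key lookup hy
  | succ n ih =>
    intro y hy
    rw [Function.iterate_succ_apply']
    obtain ⟨b, hyb, hby⟩ := Relation.TransGen.head'_iff.mp hy
    have hbb : pvReach lookup b b := Relation.TransGen.tail' hby hyb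
    rw [pvPeel, List.mem_filter]
    refine ⟨ih y hy, ?_⟩
    rw [List.any_eq_true]
    exact ⟨b, ih b hbb, hyb⟩

theorem pv_pre_acyclic (lookup : List (String × List String))
    (h : Pre_get_sizes lookup) : pvAcyclic lookup := by
  intro x hx
  have := pv_cycle_survives lookup (PySem.Dict.ofList lookup).size x hx
  rw [show (pvPeel lookup)^[(PySem.Dict.ofList lookup).size] (pvD0 lookup).keys = [] from h] at this
  simp at this

theorem pv_dep_size (lookup : List (String × List String)) :
    (get_sizes_deps lookup).size = (pvD0 lookup).keys.length := by
  simp [PySem.Dict.size, pv_dep_items, PySem.Dict.keys]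

-- ---- port B: the memoized closure ----

theorem pv_reach_unfold (lookup : List (String × List String)) (x y : String) :
    pvReach lookup x y ↔ ∃ c, pvE lookup x c ∧ (y = c ∨ pvReach lookup c y) := by
  constructor
  · intro h
    obtain ⟨b, hxb, hby⟩ := Relation.TransGen.head'_iff.mp h
    rcases Relation.reflTransGen_iff_eq_or_transGen.mp hby with rfl | hby
    · exact ⟨y, hxb, Or.inl rfl⟩
    · exact ⟨b, hxb, Or.inr hby⟩
  · rintro ⟨c, hxc, rfl | hcy⟩
    · exact Relation.TransGen.single hxc
    · exact Relation.TransGen.head hxc hcy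

-- every cached set is a completed transitive closure
def pvComplete (lookup : List (String × List String))
    (memo : PySem.Dict String (PySem.Set String)) : Prop :=
  ∀ c s, memo.get? c = some s → s.Nodup ∧ ∀ y, y ∈ s ↔ pvReach lookup c y

def pvStepB (d0 : PySem.Dict String (List String)) (fuel : Nat) (x : String) :
    (PySem.Set String × PySem.Dict String (PySem.Set String)) → String →
      (PySem.Set String × PySem.Dict String (PySem.Set String)) :=
  fun acc c =>
    if c = x then acc
    else if d0.contains c = false then acc
    else
      let rc := get_sizes_alt_closure d0 fuel c acc.2
      (PySem.Set.update (PySem.Set.add acc.1 c) rc.1, rc.2)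

theorem pv_closure_none (d0 : PySem.Dict String (List String)) (fuel : Nat)
    (x : String) (memo : PySem.Dict String (PySem.Set String))
    (hx : memo.get? x = none) :
    get_sizes_alt_closure d0 (fuel + 1) x memo
      = (((d0.getD x []).foldl (pvStepB d0 fuel x) (PySem.Set.empty, memo)).1,
         ((d0.getD x []).foldl (pvStepB d0 fuel x) (PySem.Set.empty, memo)).2.insert x
           ((d0.getD x []).foldl (pvStepB d0 fuel x) (PySem.Set.empty, memo)).1) := by
  rw [get_sizes_alt_closure, hx]
  rfl

theorem pv_closure_spec (lookup : List (String × List String))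
    (hacy : pvAcyclic lookup) :
    ∀ (n : Nat) (x : String) (fuel : Nat)
      (memo : PySem.Dict String (PySem.Set String)),
      ({y | pvReach lookup x y}).ncard = n → n < fuel →
      pvComplete lookup memo →
      ((get_sizes_alt_closure (pvD0 lookup) fuel x memo).1.Nodup ∧
       (∀ y, y ∈ (get_sizes_alt_closure (pvD0 lookup) fuel x memo).1 ↔ pvReach lookup x y) ∧
       pvComplete lookup (get_sizes_alt_closure (pvD0 lookup) fuel x memo).2) := by
  intro n
  induction n using Nat.strong_induction_on with
  | _ n ih =>
    intro x fuel memo hcard hfuel hC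
    obtain ⟨fuel, rfl⟩ : ∃ f, fuel = f + 1 := ⟨fuel - 1, by omega⟩
    cases hx : memo.get? x with
    | some t =>
      have hred : get_sizes_alt_closure (pvD0 lookup) (fuel + 1) x memo = (t, memo) := by
        rw [get_sizes_alt_closure, hx]
      rw [hred]
      obtain ⟨hnd, hmem⟩ := hC x t hx
      exact ⟨hnd, hmem, hC⟩
    | none =>
      -- the fold invariant over the children list
      have main : ∀ (L : List String), L ⊆ (pvD0 lookup).getD x [] →
          ∀ (s0 : PySem.Set String) (m : PySem.Dict String (PySem.Set String)),
          s0.Nodup → pvComplete lookup m →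
          ((L.foldl (pvStepB (pvD0 lookup) fuel x) (s0, m)).1.Nodup ∧
           (∀ y, y ∈ (L.foldl (pvStepB (pvD0 lookup) fuel x) (s0, m)).1
              ↔ y ∈ s0 ∨ ∃ c ∈ L, pvE lookup x c ∧ (y = c ∨ pvReach lookup c y)) ∧
           pvComplete lookup (L.foldl (pvStepB (pvD0 lookup) fuel x) (s0, m)).2) := by
        intro L
        induction L with
        | nil =>
          intro _ s0 m hnd hCm
          exact ⟨hnd, fun y => by simp, hCm⟩
        | cons c L ihL =>
          intro hsub s0 m hnd hCm
          simp only [List.foldl_cons]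
          by_cases h1 : c = x
          · rw [show pvStepB (pvD0 lookup) fuel x (s0, m) c = (s0, m) by
              simp [pvStepB, h1]]
            obtain ⟨e1, e2, e3⟩ :=
              ihL (fun z hz => hsub (List.mem_cons_of_mem _ hz)) s0 m hnd hCm
            refine ⟨e1, fun y => ?_, e3⟩
            rw [e2]
            constructor
            · rintro (hy | ⟨c', hc', hE, hrest⟩)
              · exact Or.inl hy
              · exact Or.inr ⟨c', List.mem_cons_of_mem _ hc', hE, hrest⟩
            · rintro (hy | ⟨c', hc', hE, hrest⟩)
              · exact Or.inl hy
              · rcases List.mem_cons.mp hc' with rfl | hc'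
                · exact absurd h1 ((pv_E_iff lookup x c').mp hE).2.1
                · exact Or.inr ⟨c', hc', hE, hrest⟩
          · by_cases h2 : (pvD0 lookup).contains c = false
            · rw [show pvStepB (pvD0 lookup) fuel x (s0, m) c = (s0, m) by
                simp [pvStepB, h1, h2]]
              obtain ⟨e1, e2, e3⟩ :=
                ihL (fun z hz => hsub (List.mem_cons_of_mem _ hz)) s0 m hnd hCm
              refine ⟨e1, fun y => ?_, e3⟩
              rw [e2]
              constructor
              · rintro (hy | ⟨c', hc', hE, hrest⟩)
                · exact Or.inl hy
                · exact Or.inr ⟨c', List.mem_cons_of_mem _ hc', hE, hrest⟩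
              · rintro (hy | ⟨c', hc', hE, hrest⟩)
                · exact Or.inl hy
                · rcases List.mem_cons.mp hc' with rfl | hc'
                  · rw [pv_E_iff] at hE
                    rw [hE.1] at h2
                    exact Bool.noConfusion h2
                  · exact Or.inr ⟨c', hc', hE, hrest⟩
            · have hstep : pvStepB (pvD0 lookup) fuel x (s0, m) c
                  = (PySem.Set.update (PySem.Set.add s0 c)
                      (get_sizes_alt_closure (pvD0 lookup) fuel c m).1,
                     (get_sizes_alt_closure (pvD0 lookup) fuel c m).2) := by
                simp [pvStepB, h1, h2]
              rw [hstep]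
              have hE : pvE lookup x c := by
                rw [pv_E_iff]
                exact ⟨by simpa [Bool.not_eq_false] using h2, h1,
                  hsub (List.mem_cons_self ..)⟩
              have hlt : ({y | pvReach lookup c y}).ncard < n := by
                rw [← hcard]; exact pv_reach_ncard_lt lookup hacy hE
              obtain ⟨r1, r2, r3⟩ := ih _ hlt c fuel m rfl (by omega) hCm
              obtain ⟨e1, e2, e3⟩ :=
                ihL (fun z hz => hsub (List.mem_cons_of_mem _ hz))
                  (PySem.Set.update (PySem.Set.add s0 c)
                    (get_sizes_alt_closure (pvD0 lookup) fuel c m).1)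
                  (get_sizes_alt_closure (pvD0 lookup) fuel c m).2
                  (PySem.Set.nodup_update _ _ (PySem.Set.nodup_add _ _ hnd)) r3
              refine ⟨e1, fun y => ?_, e3⟩
              rw [e2, PySem.Set.mem_update, PySem.Set.mem_add, r2 y]
              constructor
              · rintro (((hy | hy) | hy) | ⟨c', hc', hE', hrest⟩)
                · exact Or.inl hy
                · exact Or.inr ⟨c, List.mem_cons_self .., hE, Or.inl hy⟩
                · exact Or.inr ⟨c, List.mem_cons_self .., hE, Or.inr hy⟩
                · exact Or.inr ⟨c', List.mem_cons_of_mem _ hc', hE', hrest⟩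
              · rintro (hy | ⟨c', hc', hE', hrest⟩)
                · exact Or.inl (Or.inl (Or.inl hy))
                · rcases List.mem_cons.mp hc' with rfl | hc'
                  · rcases hrest with rfl | hrest
                    · exact Or.inl (Or.inl (Or.inr rfl))
                    · exact Or.inl (Or.inr hrest)
                  · exact Or.inr ⟨c', hc', hE', hrest⟩
      obtain ⟨e1, e2, e3⟩ := main ((pvD0 lookup).getD x []) (fun z hz => hz)
        PySem.Set.empty memo (by simp [PySem.Set.empty]) hC
      rw [pv_closure_none (pvD0 lookup) fuel x memo hx]
      have hmem : ∀ y, y ∈ (((pvD0 lookup).getD x []).foldl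
          (pvStepB (pvD0 lookup) fuel x) (PySem.Set.empty, memo)).1 ↔ pvReach lookup x y := by
        intro y
        rw [e2 y, pv_reach_unfold lookup x y]
        simp only [PySem.Set.empty, List.not_mem_nil, false_or]
        constructor
        · rintro ⟨c, _, hE, hrest⟩; exact ⟨c, hE, hrest⟩
        · rintro ⟨c, hE, hrest⟩
          exact ⟨c, ((pv_E_iff lookup x c).mp hE).2.2, hE, hrest⟩
      refine ⟨e1, hmem, ?_⟩
      intro c' s' hs'
      by_cases hcx' : c' = x
      · subst hcx'
        rw [PySem.Dict.get?_insert_self] at hs'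
        have := Option.some_inj.mp hs'
        subst this
        exact ⟨e1, hmem⟩
      · rw [PySem.Dict.get?_insert_of_ne _ _ hcx'] at hs'
        exact e3 c' s' hs'

-- ---- assembly ----

theorem pv_d0_size (lookup : List (String × List String)) :
    (pvD0 lookup).size = (pvD0 lookup).keys.length := by
  simp [PySem.Dict.size, PySem.Dict.keys]

theorem pv_len_eq (lookup : List (String × List String)) (hacy : pvAcyclic lookup)
    {k : String} {t : PySem.Set String} (hnd : t.Nodup)
    (hmem : ∀ y, y ∈ t ↔ pvReach lookup k y) :
    t.length
      = (get_sizes_mydeps (get_sizes_deps lookup) ((get_sizes_deps lookup).size + 1) k).length := by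
  have hndA := pv_mydeps_nodup lookup ((get_sizes_deps lookup).size + 1) k
  apply List.Perm.length_eq
  rw [List.perm_ext_iff_of_nodup hnd hndA]
  intro y
  rw [hmem y, pv_mydeps_iff lookup hacy (by rw [pv_dep_size]; omega) k y]

theorem pv_alt_fold (lookup : List (String × List String)) (hacy : pvAcyclic lookup) :
    ∀ (L : List String), L.Nodup →
      ∀ (out : PySem.Dict String Int) (memo : PySem.Dict String (PySem.Set String)),
      (∀ k ∈ L, out.contains k = false) → pvComplete lookup memo →
      ((L.foldl (fun (acc : PySem.Dict String Int × PySem.Dict String (PySem.Set String)) k =>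
          let r := get_sizes_alt_closure (pvD0 lookup) ((pvD0 lookup).size + 1) k acc.2
          (acc.1.insert k ((r.1.length : Int) + 1), r.2)) (out, memo)).1).items
        = out.items ++ L.map (fun k =>
            (k, ((get_sizes_mydeps (get_sizes_deps lookup)
              ((get_sizes_deps lookup).size + 1) k).length : Int) + 1)) := by
  intro L
  induction L with
  | nil => intro _ out memo _ _; simp
  | cons k L ihL =>
    intro hnd out memo hfresh hC
    simp only [List.foldl_cons, List.map_cons]
    obtain ⟨r1, r2, r3⟩ := pv_closure_spec lookup hacy _ k ((pvD0 lookup).size + 1) memo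
      rfl (by rw [pv_d0_size]; exact Nat.lt_succ_of_le (pv_reach_ncard_le lookup k))
      hC
    have hlen := pv_len_eq lookup hacy r1 r2
    rw [ihL hnd.of_cons _ _ ?fresh r3]
    · rw [hlen, PySem.Dict.items_insert_of_not_contains _ _
        (hfresh k (List.mem_cons_self ..))]
      simp
    case fresh =>
      intro k' hk'
      rw [PySem.Dict.contains_insert]
      have : k' ≠ k := by rintro rfl; exact (List.nodup_cons.mp hnd).1 hk'
      simp [this, hfresh k' (List.mem_cons_of_mem _ hk')]

theorem pv_main (lookup : List (String × List String))
    (hpre : Pre_get_sizes lookup) : get_sizes lookup = get_sizes_alt lookup := by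
  have hacy := pv_pre_acyclic lookup hpre
  show (pvD0 lookup).keys.map
        (fun k => (k, ((get_sizes_mydeps (get_sizes_deps lookup)
            ((get_sizes_deps lookup).size + 1) k).length : Int) + 1))
      = ((pvD0 lookup).keys.foldl
          (fun (acc : PySem.Dict String Int × PySem.Dict String (PySem.Set String)) k =>
            let r := get_sizes_alt_closure (pvD0 lookup)
              ((pvD0 lookup).size + 1) k acc.2
            (acc.1.insert k ((r.1.length : Int) + 1), r.2))
          (PySem.Dict.empty, PySem.Dict.empty)).1.items
  have h := pv_alt_fold lookup hacy (pvD0 lookup).keys (PySem.Dict.nodup_keys_ofList lookup)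
    PySem.Dict.empty PySem.Dict.empty
    (fun k _ => PySem.Dict.contains_empty _)
    (fun c s h => by rw [PySem.Dict.get?_empty] at h; simp at h)
  exact (h.trans (by rw [show (PySem.Dict.empty : PySem.Dict String Int).items = [] from rfl, List.nil_append])).symm

-- ===== VERDICT (by name: the statement is the Claim_ definition above) =====
theorem get_sizes_spec : Claim_equal_get_sizes := by
  intro lookup _ hpre
  unfold Spec_get_sizes
  exact pv_main lookup hpre
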